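-- pv_equiv track=rewrite | github.com/pypi-data/pypi-mirror-352 | packages/easygamechat/easygamechat-0.1.0.tar.gz/easygamechat-0.1.0/easygamechat/easygamechat.py | is_valid_nickname
-- ===== SOURCE A (Python) =====
-- MAX_NICKNAME_LENGTH = 32
--
-- def is_valid_nickname(nickname: str) -> bool:
--     """Validate nickname according to security rules"""
--     if not nickname or len(nickname) > MAX_NICKNAME_LENGTH:
--         return False
--
--     # Must start with alphanumeric
--     if not nickname[0].isalnum():
--         return False
--
--     # Only allow alphanumeric, underscore, hyphen (no consecutive special chars)
--     last_was_special = False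
--     for char in nickname:
--         if not (char.isalnum() or char in '_-'):
--             return False
--         current_is_special = char in '_-'
--         if current_is_special and last_was_special:
--             return False  # No consecutive special characters
--         last_was_special = current_is_special
--
--     # Reserved names check
--     lower = nickname.lower()
--     reserved_names = {'server', 'admin', 'system', 'null', 'undefined'}
--     if lower in reserved_names:
--         return False
--
--     return True
-- ===== SOURCE B (Python) =====
-- MAX_NICKNAME_LENGTH = 32
--
-- def is_valid_nickname(nickname: str) -> bool:
--     """Validate nickname according to security rules (segment decomposition)."""
--     if not nickname or len(nickname) > MAX_NICKNAME_LENGTH: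
--         return False
--     # Split the name into separator-delimited segments: every segment before
--     # the last must be a nonempty alphanumeric run (this covers the
--     # leading-char rule and forbids consecutive or leading separators);
--     # the final segment may also be empty (a trailing separator is allowed).
--     parts = nickname.replace('-', '_').split('_')
--     if not all(p.isalnum() for p in parts[:-1]):
--         return False
--     last = parts[-1]
--     if last and not last.isalnum():
--         return False
--     return nickname.lower() not in {'server', 'admin', 'system', 'null', 'undefined'}
-- ===== Notes on version B (the rewrite author's own statement) =====
-- stated objective: alternative
-- what changed: B tokenizes the nickname into separator-delimited segments via replace('-','_').split('_') and judges segments (every segment but the last must be a nonempty alphanumeric run, the last may also be empty), replacing A's fused per-character loop with a last_was_special flag.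
import Mathlib
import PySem

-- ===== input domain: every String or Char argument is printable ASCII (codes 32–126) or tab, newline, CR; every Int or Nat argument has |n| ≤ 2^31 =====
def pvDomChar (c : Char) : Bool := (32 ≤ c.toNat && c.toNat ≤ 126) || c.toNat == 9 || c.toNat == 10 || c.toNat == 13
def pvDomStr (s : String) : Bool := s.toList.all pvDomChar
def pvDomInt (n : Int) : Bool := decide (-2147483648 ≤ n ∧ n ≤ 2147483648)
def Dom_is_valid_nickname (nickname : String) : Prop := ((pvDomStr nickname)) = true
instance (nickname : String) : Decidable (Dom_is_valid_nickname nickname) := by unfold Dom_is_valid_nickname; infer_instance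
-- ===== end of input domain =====

-- B replaces A's fused flag-carrying character loop by a segment decomposition: split on the
-- separators and judge the segments; equivalence of return values is proved on all strings.

-- ===== PORT A =====
-- A's for-loop with its last_was_special flag, transcribed as structural recursion on the characters.
def ivnLoopA : List Char → Bool → Bool
  | [], _ => true
  | c :: rest, last =>
    if !(PySem.Chars.isalnum c || c = '_' || c = '-') then false
    else
      let cur : Bool := c = '_' || c = '-'
      if cur && last then false
      else ivnLoopA rest cur

def is_valid_nickname (nickname : String) : Bool :=
  if nickname.toList.isEmpty || PySem.Str.len nickname > 32 then false
  else
    match PySem.Str.pyGet? nickname 0 with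
    | none => false   -- unreachable: nickname nonempty
    | some c0 =>
      if !PySem.Chars.isalnum c0 then false
      else if !ivnLoopA nickname.toList false then false
      else
        let lower := PySem.Str.lower nickname
        if ["server", "admin", "system", "null", "undefined"].contains lower then false
        else true

-- ===== PORT B =====
def is_valid_nickname_alt (nickname : String) : Bool :=
  if nickname.toList.isEmpty || PySem.Str.len nickname > 32 then false
  else
    -- parts = nickname.replace('-', '_').split('_'); '_' ≠ '' so split? is always some
    let parts : List String :=
      (PySem.Str.split? (PySem.Str.replace nickname "-" "_") "_").getD []
    if !(parts.dropLast.all (fun p => PySem.Str.strIsalnum p)) then false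
    else
      let last := parts.getLastD ""   -- parts[-1]; split always returns a nonempty list
      if !last.toList.isEmpty && !PySem.Str.strIsalnum last then false
      else !(["server", "admin", "system", "null", "undefined"].contains (PySem.Str.lower nickname))

-- ===== PRECONDITION & SPEC =====
def Spec_is_valid_nickname (nickname : String) (out : Bool) : Prop := out = is_valid_nickname_alt nickname
instance (nickname : String) (out : Bool) : Decidable (Spec_is_valid_nickname nickname out) := by unfold Spec_is_valid_nickname; infer_instance

-- ===== CLAIM (what is proved, stated in full; the proofs are below) =====
def Claim_equal_is_valid_nickname : Prop := ∀ (nickname : String), Dom_is_valid_nickname nickname → Spec_is_valid_nickname nickname (is_valid_nickname nickname)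

-- ===== LEMMAS AND PROOFS =====

-- the character substitution performed by replace('-', '_')
def ivnR (c : Char) : Char := if c = '-' then '_' else c

-- structural specification of splitting on '_'
def splitSpec : List Char → List Char → List (List Char)
  | pre, [] => [pre]
  | pre, c :: t => if c = '_' then pre :: splitSpec [] t else splitSpec (pre ++ [c]) t

-- B's judgement of the segment list, on the character level
def validPartsC (ps : List (List Char)) : Bool :=
  ps.dropLast.all PySem.Chars.strIsalnum
    && ((ps.getLastD []).isEmpty || PySem.Chars.strIsalnum (ps.getLastD []))

theorem ivn_replace_go (l : List Char) : ∀ (fuel : Nat) (acc : List Char), l.length ≤ fuel →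
    PySem.Chars.replace.go ['-'] ['_'] fuel l acc = acc.reverse ++ l.map ivnR := by
  induction l with
  | nil => intro fuel acc _; cases fuel <;> simp [PySem.Chars.replace.go]
  | cons c t ih =>
    intro fuel acc h
    cases fuel with
    | zero => simp at h
    | succ f =>
      simp only [PySem.Chars.replace.go, List.isPrefixOf]
      by_cases hc : c = '-'
      · subst hc
        rw [if_pos (by simp)]
        simp only [List.length_singleton, List.drop_succ_cons, List.drop_zero]
        rw [ih f _ (by simpa using h)]
        simp [ivnR]
      · rw [if_neg (by simp [Ne.symm hc])]
        rw [ih f _ (by simpa using h)]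
        simp [ivnR, hc]

theorem ivn_replace (cs : List Char) :
    PySem.Chars.replace cs ['-'] ['_'] = cs.map ivnR := by
  simp [PySem.Chars.replace, ivn_replace_go cs cs.length [] le_rfl]

theorem ivn_splitOn_go (l : List Char) : ∀ (fuel : Nat) (cur : List Char) (acc : List (List Char)),
    l.length < fuel →
    PySem.Chars.splitOn.go ['_'] fuel l cur acc = acc.reverse ++ splitSpec cur.reverse l := by
  induction l with
  | nil =>
    intro fuel cur acc _
    cases fuel <;> simp [PySem.Chars.splitOn.go, splitSpec]
  | cons c t ih =>
    intro fuel cur acc h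
    cases fuel with
    | zero => simp at h
    | succ f =>
      simp only [PySem.Chars.splitOn.go, List.isPrefixOf]
      by_cases hc : c = '_'
      · subst hc
        rw [if_pos (by simp)]
        simp only [List.length_singleton, List.drop_succ_cons, List.drop_zero]
        rw [ih f [] _ (by simpa using h)]
        simp [splitSpec]
      · rw [if_neg (by simp [Ne.symm hc])]
        rw [ih f (c :: cur) _ (by simpa using h)]
        simp [splitSpec, hc]

theorem ivn_splitOn (cs : List Char) :
    PySem.Chars.splitOn cs ['_'] = splitSpec [] cs := by
  have := ivn_splitOn_go cs (cs.length + 1) [] [] (by omega)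
  simpa [PySem.Chars.splitOn] using this

theorem ivn_getLastD_cons {α : Type} (p : α) (ps : List α) (d : α) (h : ps ≠ []) :
    (p :: ps).getLastD d = ps.getLastD d := by
  cases ps with
  | nil => exact absurd rfl h
  | cons q qs => rfl

theorem splitSpec_ne_nil (pre l : List Char) : splitSpec pre l ≠ [] := by
  induction l generalizing pre with
  | nil => simp [splitSpec]
  | cons c t ih => simp only [splitSpec]; split_ifs <;> simp [ih]

theorem validParts_cons (p : List Char) (ps : List (List Char)) (h : ps ≠ []) :
    validPartsC (p :: ps) = (PySem.Chars.strIsalnum p && validPartsC ps) := by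
  unfold validPartsC
  rw [List.dropLast_cons_of_ne_nil h, ivn_getLastD_cons _ _ _ h]
  simp [Bool.and_assoc]

-- segments whose pending prefix already contains an illegal character always fail
theorem spec_bad (cs : List Char) : ∀ (pre : List Char),
    pre.all PySem.Chars.isalnum = false →
    validPartsC (splitSpec pre (cs.map ivnR)) = false := by
  induction cs with
  | nil =>
    intro pre h
    have hne : pre ≠ [] := by rintro rfl; simp at h
    simp [splitSpec, validPartsC, PySem.Chars.strIsalnum, h, hne]
  | cons c t ih =>
    intro pre h
    by_cases hc : ivnR c = '_'
    · simp only [List.map_cons, splitSpec, hc, if_true]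
      rw [validParts_cons _ _ (splitSpec_ne_nil _ _)]
      simp [PySem.Chars.strIsalnum, h]
    · simp only [List.map_cons, splitSpec, hc, if_neg hc]
      exact ih _ (by simp [List.all_append, h])

-- '_' and '-' are not alphanumeric
theorem not_alnum_us : PySem.Chars.isalnum '_' = false := by decide
theorem not_alnum_hy : PySem.Chars.isalnum '-' = false := by decide

-- the key simulation: B's segment judgement tracks A's loop.
-- First component: mid-segment state (pending prefix nonempty and clean ↔ last_was_special = false);
-- second component: just-after-a-separator state (pending prefix empty ↔ last_was_special = true).
theorem spec_key (cs : List Char) :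
    (∀ (pre : List Char), pre ≠ [] → pre.all PySem.Chars.isalnum = true →
        validPartsC (splitSpec pre (cs.map ivnR)) = ivnLoopA cs false)
    ∧ validPartsC (splitSpec [] (cs.map ivnR)) = ivnLoopA cs true := by
  induction cs with
  | nil =>
    refine ⟨fun pre hne hall => ?_, ?_⟩
    · simp [splitSpec, validPartsC, ivnLoopA, PySem.Chars.strIsalnum, hne, hall]
    · simp [splitSpec, validPartsC, ivnLoopA]
  | cons c t ih =>
    have hspecial : ∀ c : Char, (c = '_' ∨ c = '-') ↔ ivnR c = '_' := by
      intro c; unfold ivnR; constructor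
      · rintro (rfl | rfl) <;> simp
      · split_ifs with h
        · intro _; right; exact h
        · intro h2; left; exact h2
    constructor
    · intro pre hne hall
      by_cases hc : ivnR c = '_'
      · -- c is a separator; last = false, so the loop continues in the "after separator" state
        have hcs : c = '_' ∨ c = '-' := (hspecial c).mpr hc
        simp only [List.map_cons, splitSpec, hc, if_true]
        rw [validParts_cons _ _ (splitSpec_ne_nil _ _)]
        have hA : ivnLoopA (c :: t) false = ivnLoopA t true := by
          rcases hcs with rfl | rfl <;> simp [ivnLoopA, not_alnum_us, not_alnum_hy]
        rw [hA, ih.2]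
        simp [PySem.Chars.strIsalnum, hne, hall]
      · have hcs : ¬ (c = '_' ∨ c = '-') := fun h => hc ((hspecial c).mp h)
        push_neg at hcs
        have hrc : ivnR c = c := by simp [ivnR, hcs.2]
        simp only [List.map_cons, hrc, splitSpec, if_neg hcs.1, List.nil_append]
        by_cases ha : PySem.Chars.isalnum c = true
        · rw [ih.1 (pre ++ [c]) (by simp) (by simp [List.all_append, hall, ha])]
          simp [ivnLoopA, ha, hcs.1, hcs.2]
        · have ha' : PySem.Chars.isalnum c = false := by simpa using ha
          rw [spec_bad t _ (by simp [List.all_append, ha'])]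
          simp [ivnLoopA, ha', hcs.1, hcs.2]
    · by_cases hc : ivnR c = '_'
      · -- a separator right after a separator: both sides fail
        have hcs : c = '_' ∨ c = '-' := (hspecial c).mpr hc
        simp only [List.map_cons, splitSpec, hc, if_true]
        rw [validParts_cons _ _ (splitSpec_ne_nil _ _)]
        have hA : ivnLoopA (c :: t) true = false := by
          rcases hcs with rfl | rfl <;> simp [ivnLoopA, not_alnum_us, not_alnum_hy]
        simp [hA, PySem.Chars.strIsalnum]
      · have hcs : ¬ (c = '_' ∨ c = '-') := fun h => hc ((hspecial c).mp h)
        push_neg at hcs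
        have hrc : ivnR c = c := by simp [ivnR, hcs.2]
        simp only [List.map_cons, hrc, splitSpec, if_neg hcs.1, List.nil_append]
        by_cases ha : PySem.Chars.isalnum c = true
        · rw [ih.1 [c] (by simp) (by simp [ha])]
          simp [ivnLoopA, ha, hcs.1, hcs.2]
        · have ha' : PySem.Chars.isalnum c = false := by simpa using ha
          rw [spec_bad t _ (by simp [ha'])]
          simp [ivnLoopA, ha', hcs.1, hcs.2]

-- B's string-level segment test equals validPartsC on the character level
theorem ivn_map_dropLast {a b : Type} (f : a → b) (ps : List a) :
    (ps.map f).dropLast = ps.dropLast.map f := by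
  induction ps with
  | nil => rfl
  | cons p ps ih =>
    cases ps with
    | nil => rfl
    | cons q qs => simp [List.dropLast_cons_of_ne_nil]

theorem ivn_map_getLastD (ps : List (List Char)) (h : ps ≠ []) :
    (ps.map String.ofList).getLastD "" = String.ofList (ps.getLastD []) := by
  induction ps with
  | nil => exact absurd rfl h
  | cons p ps ih =>
    cases ps with
    | nil => rfl
    | cons q qs =>
      rw [List.map_cons, ivn_getLastD_cons _ _ _ (by simp), ivn_getLastD_cons _ _ _ (by simp : q :: qs ≠ [])]
      exact ih (by simp)

theorem alt_parts_eq (ps : List (List Char)) (h : ps ≠ []) :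
    ((ps.map String.ofList).dropLast.all (fun p => PySem.Str.strIsalnum p)
      && ((((ps.map String.ofList).getLastD "").toList.isEmpty)
            || PySem.Str.strIsalnum ((ps.map String.ofList).getLastD "")))
    = validPartsC ps := by
  rw [ivn_map_dropLast, ivn_map_getLastD ps h, List.all_map]
  unfold validPartsC
  simp only [Function.comp_def, PySem.Str.strIsalnum, String.toList_ofList]

-- pure Boolean endgame: both branch cascades agree given the segment/loop correspondence
theorem ivn_bool_endgame (a l b1 e s r : Bool) (h : (b1 && (e || s)) = (a && l)) :
    (if !a then false else if !l then false else if r then false else true)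
    = (if !b1 then false else if !e && !s then false else !r) := by
  cases a <;> cases l <;> cases b1 <;> cases e <;> cases s <;> cases r <;> simp_all

-- B's segment judgement equals A's head test plus loop, on any nonempty character list
theorem ivn_key (c0 : Char) (t : List Char) :
    validPartsC (splitSpec [] ((c0 :: t).map ivnR))
      = (PySem.Chars.isalnum c0 && ivnLoopA (c0 :: t) false) := by
  by_cases hr : ivnR c0 = '_'
  · have hcs : c0 = '_' ∨ c0 = '-' := by
      by_contra hx
      push_neg at hx
      simp [ivnR, hx.2] at hr
      exact hx.1 hr
    have hna : PySem.Chars.isalnum c0 = false := by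
      rcases hcs with rfl | rfl
      · exact not_alnum_us
      · exact not_alnum_hy
    simp only [List.map_cons, splitSpec, hr, if_true]
    rw [validParts_cons _ _ (splitSpec_ne_nil _ _)]
    simp [PySem.Chars.strIsalnum, hna]
  · have hcs : c0 ≠ '_' ∧ c0 ≠ '-' := by
      constructor
      · intro hx; subst hx; simp [ivnR] at hr
      · intro hx; subst hx; simp [ivnR] at hr
    have hrc : ivnR c0 = c0 := by simp [ivnR, hcs.2]
    simp only [List.map_cons, hrc, splitSpec, if_neg hcs.1, List.nil_append]
    by_cases ha : PySem.Chars.isalnum c0 = true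
    · rw [(spec_key t).1 [c0] (by simp) (by simp [ha])]
      simp [ivnLoopA, ha, hcs.1, hcs.2]
    · have ha' : PySem.Chars.isalnum c0 = false := by simpa using ha
      rw [spec_bad t [c0] (by simp [ha'])]
      simp [ha']

-- ===== VERDICT (by name: the statement is the Claim_ definition above) =====
theorem is_valid_nickname_spec : Claim_equal_is_valid_nickname := by
  unfold Claim_equal_is_valid_nickname
  intro nickname _
  unfold Spec_is_valid_nickname is_valid_nickname is_valid_nickname_alt
  cases h : nickname.toList.isEmpty || PySem.Str.len nickname > 32 with
  | true => simp
  | false =>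
    simp only [h, Bool.false_eq_true, if_false]
    have hne : nickname.toList ≠ [] := by
      intro hn
      simp [List.isEmpty_iff.mpr hn] at h
    obtain ⟨c0, t, hct⟩ : ∃ c0 t, nickname.toList = c0 :: t := by
      cases hcs : nickname.toList with
      | nil => exact absurd hcs hne
      | cons a b => exact ⟨a, b, rfl⟩
    have hget : PySem.Str.pyGet? nickname 0 = some c0 := by
      simp [PySem.Str.pyGet?, PySem.Chars.pyGet?_eq_listPyGet?, PySem.List.pyGet?, PySem.List.pyIdx?, hct]
    have hsplit : (PySem.Str.split? (PySem.Str.replace nickname "-" "_") "_").getD []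
        = List.map String.ofList (splitSpec [] (nickname.toList.map ivnR)) := by
      simp [PySem.Str.split?, PySem.Chars.split?, PySem.Str.toList_replace,
        show ("-" : String).toList = ['-'] from rfl, show ("_" : String).toList = ['_'] from rfl,
        ivn_replace, ivn_splitOn]
    simp only [hget, hsplit]
    have hB := alt_parts_eq (splitSpec [] (nickname.toList.map ivnR)) (splitSpec_ne_nil _ _)
    rw [show validPartsC (splitSpec [] (nickname.toList.map ivnR))
          = (PySem.Chars.isalnum c0 && ivnLoopA nickname.toList false) by
        rw [hct]; exact ivn_key c0 t] at hB
    exact ivn_bool_endgame _ _ _ _ _ _ hB
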